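-- pv_equiv track=rewrite | github.com/Gissio/radpro | tools/textproc.py | build_codepoint_set
-- ===== SOURCE A (Python) =====
-- def build_codepoint_set(codepoints):
--     if not codepoints:
--         return ''
--
--     def build_codepoint_range(start, end):
--         if start == end:
--             return f'{hex(start)}'
--         else:
--             return f'{hex(start)}-{hex(end)}'
--
--     codepoint_list = list(codepoints)
--     codepoint_list.sort()
--
--     codepoint_ranges = []
--     start = codepoint_list[0]
--     prev = codepoint_list[0]
--
--     for codepoint in codepoint_list[1:]:
--         if codepoint != prev + 1:
--             codepoint_ranges.append(build_codepoint_range(start, prev))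
--             start = codepoint
--         prev = codepoint
--
--     codepoint_ranges.append(build_codepoint_range(start, prev))
--
--     return codepoint_ranges
-- ===== SOURCE B (Python) =====
-- def build_codepoint_set(codepoints):
--     if not codepoints:
--         return ''
--
--     s = sorted(codepoints)
--     # staged passes: 1) list the cut positions (where the sorted neighbour is not
--     # the successor), 2) turn consecutive bounds into slices, 3) format each slice
--     cuts = [i for i, (a, b) in enumerate(zip(s, s[1:]), 1) if b - a != 1]
--     bounds = [0] + cuts + [len(s)]
--     out = []
--     for a, b in zip(bounds, bounds[1:]):
--         seg = s[a:b]
--         first, last = seg[0], seg[-1]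
--         out.append(hex(first) if first == last else f'{hex(first)}-{hex(last)}')
--     return out
-- ===== Notes on version B (the rewrite author's own statement) =====
-- stated objective: alternative
-- what changed: Replaced A's single stateful (start, prev) accumulator pass with staged passes: first compute the list of cut indices over zip(s, s[1:]), then pair consecutive bounds, slice each segment out of the sorted list and format its first/last element; Pre_ excludes the empty list, on which A returns the string '' rather than a list.
-- outside the precondition, e.g. on build_codepoint_set(set()): A returns '', B returns ''
import Mathlib
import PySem

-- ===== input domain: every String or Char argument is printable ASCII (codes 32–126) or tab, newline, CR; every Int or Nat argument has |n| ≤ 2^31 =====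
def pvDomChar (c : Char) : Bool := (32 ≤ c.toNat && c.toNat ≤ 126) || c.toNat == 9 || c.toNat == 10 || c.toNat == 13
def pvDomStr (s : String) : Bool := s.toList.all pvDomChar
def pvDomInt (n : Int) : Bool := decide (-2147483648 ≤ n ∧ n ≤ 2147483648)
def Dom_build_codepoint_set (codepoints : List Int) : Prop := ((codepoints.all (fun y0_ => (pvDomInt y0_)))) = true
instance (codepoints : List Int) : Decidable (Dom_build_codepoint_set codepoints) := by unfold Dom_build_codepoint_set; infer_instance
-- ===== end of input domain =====

-- B replaces A's single stateful (start, prev) accumulator pass with staged passes: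
-- compute the cut positions over zip(s, s[1:]), pair consecutive bounds, slice each
-- segment out of the sorted list and format its endpoints (return value equivalence only).


-- hex(n): '0x…' lowercase digits, '-0x…' for negatives (shared by both ports, as both Pythons call hex())
def pyHex (n : Int) : String :=
  if n < 0 then "-0x" ++ String.ofList (Nat.toDigits 16 n.natAbs)
  else "0x" ++ String.ofList (Nat.toDigits 16 n.toNat)

-- ===== PORT A =====
-- A's nested helper build_codepoint_range
def build_codepoint_range (start «end» : Int) : String :=
  if start = «end» then pyHex start else pyHex start ++ "-" ++ pyHex «end»

-- A: sort, then one pass keeping (ranges, start, prev); empty input returns '' in Python (excluded by Pre_)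
def build_codepoint_set (codepoints : List Int) : List String :=
  match PySem.List.sorted codepoints (fun x => x) false with
  | [] => []  -- Python returns '' here; excluded by Pre_build_codepoint_set
  | c0 :: rest =>
    let st := rest.foldl
      (fun (acc : List String × Int × Int) codepoint =>
        if codepoint ≠ acc.2.2 + 1 then
          (acc.1 ++ [build_codepoint_range acc.2.1 acc.2.2], codepoint, codepoint)
        else
          (acc.1, acc.2.1, codepoint))
      ([], c0, c0)
    st.1 ++ [build_codepoint_range st.2.1 st.2.2]

-- ===== PORT B =====
-- B: staged passes — cut indices via enumerate(zip(s, s[1:]), 1), then bounds, then one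
-- slice + format per pair of consecutive bounds. Every generated slice is nonempty, so
-- Python's seg[0]/seg[-1] never raise; the '.getD 0' default of pyGet? is never used.
def build_codepoint_set_alt (codepoints : List Int) : List String :=
  match codepoints with
  | [] => []  -- Python returns '' here; excluded by Pre_build_codepoint_set
  | _ =>
    let s := PySem.List.sorted codepoints (fun x => x) false
    let cuts := ((PySem.List.enumerate (s.zip (PySem.List.slice s (some 1) none)) 1).filter
        (fun t => decide (t.2.2 - t.2.1 ≠ 1))).map Prod.fst
    let bounds : List Int := 0 :: cuts ++ [(s.length : Int)]
    (bounds.zip (PySem.List.slice bounds (some 1) none)).map (fun ab =>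
      let seg := PySem.List.slice s (some ab.1) (some ab.2)
      let first := (PySem.List.pyGet? seg 0).getD 0
      let last := (PySem.List.pyGet? seg (-1)).getD 0
      if first = last then pyHex first else pyHex first ++ "-" ++ pyHex last)

-- ===== PRECONDITION & SPEC =====
-- Pre_ excludes only the empty list, on which A returns the string '' — not a list of range strings.
def Pre_build_codepoint_set (codepoints : List Int) : Prop := codepoints ≠ []
instance (codepoints : List Int) : Decidable (Pre_build_codepoint_set codepoints) := by
  unfold Pre_build_codepoint_set; infer_instance

def pvWitness_build_codepoint_set : List Int := [65, 66, 67]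

def Spec_build_codepoint_set (codepoints : List Int) (out : List String) : Prop :=
  out = build_codepoint_set_alt codepoints
instance (codepoints : List Int) (out : List String) : Decidable (Spec_build_codepoint_set codepoints out) := by
  unfold Spec_build_codepoint_set; infer_instance

-- ===== CLAIM (what is proved, stated in full; the proofs are below) =====
def Claim_equal_build_codepoint_set : Prop := ∀ (codepoints : List Int), Dom_build_codepoint_set codepoints → Pre_build_codepoint_set codepoints → Spec_build_codepoint_set codepoints (build_codepoint_set codepoints)

-- ===== LEMMAS AND PROOFS =====

-- value-level chunking both sides reduce to: maximal runs of consecutive successors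
def chunks : List Int → List (List Int)
  | [] => []
  | c :: cs =>
    match chunks cs with
    | (y :: g) :: gs => if y = c + 1 then (c :: y :: g) :: gs else [c] :: (y :: g) :: gs
    | _ => [[c]]

theorem chunks_cons_eq (c : Int) (cs : List Int) :
    chunks (c :: cs) = (match chunks cs with
      | (y :: g) :: gs => if y = c + 1 then (c :: y :: g) :: gs else [c] :: (y :: g) :: gs
      | _ => [[c]]) := rfl

def emitChunk (g : List Int) : String :=
  if g.headD 0 = g.getLastD 0 then pyHex (g.headD 0)
  else pyHex (g.headD 0) ++ "-" ++ pyHex (g.getLastD 0)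

theorem chunks_cons_head (c : Int) (cs : List Int) :
    ∃ g gs, chunks (c :: cs) = (c :: g) :: gs := by
  simp only [chunks]
  rcases h : chunks cs with _ | ⟨_ | ⟨y, g⟩, gs⟩
  · exact ⟨[], [], rfl⟩
  · exact ⟨[], _, rfl⟩
  · by_cases hy : y = c + 1 <;> simp [hy]

theorem chunks_cons_match (c : Int) {cs : List Int} {y : Int} {g : List Int} {gs : List (List Int)}
    (h : chunks cs = (y :: g) :: gs) :
    chunks (c :: cs) = if y = c + 1 then (c :: y :: g) :: gs else [c] :: (y :: g) :: gs := by
  rw [chunks_cons_eq, h]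

theorem chunks_mem_ne_nil (s : List Int) : ∀ g ∈ chunks s, g ≠ [] := by
  induction s with
  | nil => intro g hg; simp [chunks] at hg
  | cons c cs ih =>
    intro g hg
    rcases h : chunks cs with _ | ⟨g0, gs⟩
    · rw [chunks_cons_eq, h] at hg
      simp at hg; simp [hg]
    · rcases g0 with _ | ⟨y, g'⟩
      · rw [chunks_cons_eq, h] at hg
        simp_all
      · rw [chunks_cons_match c h] at hg
        by_cases hy : y = c + 1
        · rw [if_pos hy] at hg
          rcases List.mem_cons.mp hg with hg | hg
          · simp [hg]
          · exact ih g (h ▸ List.mem_cons_of_mem _ hg)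
        · rw [if_neg hy] at hg
          rcases List.mem_cons.mp hg with hg | hg
          · simp [hg]
          · exact ih g (h ▸ hg)

theorem chunks_flatten (s : List Int) : (chunks s).flatten = s := by
  induction s with
  | nil => rfl
  | cons c cs ih =>
    rcases h : chunks cs with _ | ⟨g0, gs⟩
    · rw [h] at ih; simp at ih
      rw [chunks_cons_eq, h, ← ih]
      simp
    · rcases g0 with _ | ⟨y, g⟩
      · exact absurd rfl (chunks_mem_ne_nil cs [] (h ▸ List.mem_cons_self))
      · rw [h] at ih
        rw [chunks_cons_match c h]
        by_cases hy : y = c + 1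
        · rw [if_pos hy]
          simpa using congrArg (List.cons c) ih
        · rw [if_neg hy]
          simpa using congrArg (List.cons c) ih

-- A's fold over the tail produces the chunk ranges
theorem foldA_eq_chunks (cs : List Int) : ∀ (rs : List String) (st pv : Int),
    (cs.foldl
        (fun (acc : List String × Int × Int) codepoint =>
          if codepoint ≠ acc.2.2 + 1 then
            (acc.1 ++ [build_codepoint_range acc.2.1 acc.2.2], codepoint, codepoint)
          else
            (acc.1, acc.2.1, codepoint))
        (rs, st, pv)).1
      ++ [build_codepoint_range
            (cs.foldl
              (fun (acc : List String × Int × Int) codepoint =>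
                if codepoint ≠ acc.2.2 + 1 then
                  (acc.1 ++ [build_codepoint_range acc.2.1 acc.2.2], codepoint, codepoint)
                else
                  (acc.1, acc.2.1, codepoint))
              (rs, st, pv)).2.1
            (cs.foldl
              (fun (acc : List String × Int × Int) codepoint =>
                if codepoint ≠ acc.2.2 + 1 then
                  (acc.1 ++ [build_codepoint_range acc.2.1 acc.2.2], codepoint, codepoint)
                else
                  (acc.1, acc.2.1, codepoint))
              (rs, st, pv)).2.2]
    = rs ++ (match chunks (pv :: cs) with
        | g :: gs => build_codepoint_range st (g.getLastD 0) :: gs.map emitChunk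
        | [] => []) := by
  induction cs with
  | nil => intro rs st pv; simp [chunks]
  | cons c cs' ih =>
    intro rs st pv
    obtain ⟨g, gs, hg⟩ := chunks_cons_head c cs'
    by_cases hc : c = pv + 1
    · have hstep : ¬ (c ≠ pv + 1) := by simpa using hc
      simp only [List.foldl_cons, if_neg hstep]
      rw [ih rs st c]
      have hch : chunks (pv :: c :: cs') = (pv :: c :: g) :: gs := by
        rw [chunks_cons_eq, hg]; simp [hc]
      rw [hch, hg]
      simp
    · have hstep : (c ≠ pv + 1) := hc
      simp only [List.foldl_cons, if_pos hstep]
      rw [ih (rs ++ [build_codepoint_range st pv]) c c]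
      have hch : chunks (pv :: c :: cs') = [pv] :: (c :: g) :: gs := by
        rw [chunks_cons_eq, hg]; simp [hc]
      rw [hch, hg]
      have hemit : emitChunk (c :: g) = build_codepoint_range c ((c :: g).getLastD 0) := by
        simp [emitChunk, build_codepoint_range]
      simp [hemit]

-- ---- B side: cut positions, bounds, segment pairs ----

-- the cut-position list B computes (after s[1:] = tail), with starting index k
def cutsE (s : List Int) (k : Int) : List Int :=
  ((PySem.List.enumerate (s.zip s.tail) k).filter (fun t => decide (t.2.2 - t.2.1 ≠ 1))).map Prod.fst

theorem cutsE_cons₂ (a b : Int) (t : List Int) (k : Int) :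
    cutsE (a :: b :: t) k = (if b - a ≠ 1 then [k] else []) ++ cutsE (b :: t) (k + 1) := by
  simp only [cutsE, List.tail, List.zip_cons_cons, PySem.List.enumerate_cons]
  by_cases h : b - a ≠ 1 <;> simp [h]

theorem cutsE_shift (s : List Int) : ∀ (k c : Int), cutsE s (k + c) = (cutsE s k).map (· + c) := by
  induction s with
  | nil => intro k c; rfl
  | cons a t ih =>
    intro k c
    cases t with
    | nil => rfl
    | cons b t' =>
      rw [cutsE_cons₂, cutsE_cons₂]
      have : k + c + 1 = (k + 1) + c := by ring
      rw [this, ih (k + 1) c]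
      by_cases h : b - a ≠ 1 <;> simp [h]

-- cumulative bounds of a partition
def bnds : List (List Int) → List Int
  | [] => [0]
  | g :: gs => 0 :: (bnds gs).map (· + (g.length : Int))

theorem bnds_head : ∀ (gs : List (List Int)), ∃ r, bnds gs = 0 :: r := by
  intro gs; cases gs <;> exact ⟨_, rfl⟩

-- the bounds B builds are exactly the cumulative chunk lengths
theorem bnds_chunks : ∀ (s : List Int), s ≠ [] →
    bnds (chunks s) = 0 :: cutsE s 1 ++ [(s.length : Int)] := by
  intro s
  induction s with
  | nil => intro h; exact absurd rfl h
  | cons a t ih =>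
    intro _
    cases t with
    | nil => simp [chunks, bnds, cutsE]
    | cons b t' =>
      obtain ⟨g, gs, hg⟩ := chunks_cons_head b t'
      have hih := ih (by simp)
      rw [hg] at hih
      have htail : (bnds gs).map (· + ((1 : Int) + g.length)) = cutsE (b :: t') 1 ++ [((b :: t').length : Int)] := by
        have : bnds ((b :: g) :: gs) = 0 :: (bnds gs).map (· + ((b :: g).length : Int)) := rfl
        rw [this] at hih
        have hc : ((b :: g).length : Int) = (1 : Int) + g.length := by push_cast [List.length_cons]; ring
        rw [hc] at hih
        exact (List.cons_eq_cons.mp hih).2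
      by_cases hb : b = a + 1
      · have hch : chunks (a :: b :: t') = (a :: b :: g) :: gs := by
          rw [chunks_cons_eq, hg]; simp [hb]
        rw [hch]
        have hbn : bnds ((a :: b :: g) :: gs) = 0 :: (bnds gs).map (· + ((2 : Int) + g.length)) := by
          simp only [bnds]
          congr 1
          apply List.map_congr_left
          intro x _
          push_cast [List.length_cons]
          ring
        rw [hbn]
        have hmm : (bnds gs).map (· + ((2 : Int) + g.length))
            = ((bnds gs).map (· + ((1 : Int) + g.length))).map (· + 1) := by
          rw [List.map_map]; apply List.map_congr_left; intro x _; simp; ring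
        rw [hmm, htail]
        have hcut : cutsE (a :: b :: t') 1 = cutsE (b :: t') 2 := by
          rw [cutsE_cons₂]
          have : b - a ≠ 1 ↔ False := by constructor <;> intro h <;> [exact h (by omega); exact h.elim]
          simp [hb]
        have hsh : cutsE (b :: t') 2 = (cutsE (b :: t') 1).map (· + 1) := by
          have := cutsE_shift (b :: t') 1 1
          simpa using this
        rw [hcut, hsh]
        simp
      · have hch : chunks (a :: b :: t') = [a] :: (b :: g) :: gs := by
          rw [chunks_cons_eq, hg]; simp [hb]
        rw [hch]
        have hbn : bnds ([a] :: (b :: g) :: gs) = 0 :: (bnds ((b :: g) :: gs)).map (· + 1) := by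
          simp only [bnds]; norm_num
        rw [hbn, hih]
        have hcut : cutsE (a :: b :: t') 1 = 1 :: cutsE (b :: t') 2 := by
          rw [cutsE_cons₂]
          have : b - a ≠ 1 := by omega
          simp [this]
        have hsh : cutsE (b :: t') 2 = (cutsE (b :: t') 1).map (· + 1) := by
          have := cutsE_shift (b :: t') 1 1
          simpa using this
        rw [hcut, hsh]
        simp

-- pairs of consecutive bounds
def segPairs (k : Int) : List (List Int) → List (Int × Int)
  | [] => []
  | g :: gs => (k, k + g.length) :: segPairs (k + g.length) gs

theorem zip_bnds_shift : ∀ (gs : List (List Int)) (c : Int),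
    ((bnds gs).map (· + c)).zip (((bnds gs).map (· + c)).tail) = segPairs c gs := by
  intro gs
  induction gs with
  | nil => intro c; rfl
  | cons g gs ih =>
    intro c
    obtain ⟨r, hr⟩ := bnds_head gs
    have h1 : bnds (g :: gs) = 0 :: (bnds gs).map (· + (g.length : Int)) := rfl
    rw [h1]
    simp only [List.map_cons, List.map_map, List.tail_cons]
    have hcomp : (bnds gs).map ((fun x => x + c) ∘ (fun x => x + (g.length : Int)))
        = (bnds gs).map (· + ((g.length : Int) + c)) := by
      apply List.map_congr_left; intro x _; simp; ring
    rw [hcomp, hr]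
    simp only [List.map_cons, zero_add, List.zip_cons_cons]
    have h2 : List.map (fun x => x + ((g.length : Int) + c)) r
        = ((bnds gs).map (fun x => x + ((g.length : Int) + c))).tail := by rw [hr]; rfl
    have hz : (((bnds gs).map (· + ((g.length : Int) + c)))).zip
        ((bnds gs).map (· + ((g.length : Int) + c))).tail = segPairs ((g.length : Int) + c) gs := ih _
    have h4 : ((g.length : Int) + c) :: List.map (fun x => x + ((g.length : Int) + c)) r
        = List.map (fun x => x + ((g.length : Int) + c)) (bnds gs) := by rw [hr]; simp
    rw [h4, h2, hz]
    simp only [segPairs]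
    congr 1
    · rw [Prod.mk.injEq]; exact ⟨rfl, by ring⟩
    · rw [show (g.length : Int) + c = c + (g.length : Int) by ring]

theorem zip_bnds (gs : List (List Int)) : (bnds gs).zip (bnds gs).tail = segPairs 0 gs := by
  have h := zip_bnds_shift gs 0
  simpa using h

-- slicing a concatenation at consecutive cumulative bounds returns the parts
theorem slice_segPairs : ∀ (gs : List (List Int)) (pre : List Int),
    (segPairs (pre.length : Int) gs).map
      (fun ab => PySem.List.slice (pre ++ gs.flatten) (some ab.1) (some ab.2)) = gs := by
  intro gs
  induction gs with
  | nil => intro pre; rfl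
  | cons g gs ih =>
    intro pre
    simp only [segPairs, List.map_cons, List.flatten_cons]
    congr 1
    · rw [PySem.List.slice_natCast_add, List.drop_left, List.take_left]
    · have hlen : (pre.length : Int) + (g.length : Int) = ((pre ++ g).length : Int) := by
        simp
      have hassoc : pre ++ (g ++ gs.flatten) = (pre ++ g) ++ gs.flatten := by
        rw [List.append_assoc]
      rw [hlen, hassoc]
      exact ih (pre ++ g)

-- B's per-segment formatter, named for the proofs (defeq to the lambda in the B port)
def fmtSeg (seg : List Int) : String :=
  if (PySem.List.pyGet? seg 0).getD 0 = (PySem.List.pyGet? seg (-1)).getD 0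
  then pyHex ((PySem.List.pyGet? seg 0).getD 0)
  else pyHex ((PySem.List.pyGet? seg 0).getD 0) ++ "-" ++ pyHex ((PySem.List.pyGet? seg (-1)).getD 0)

theorem emit_eq_emitChunk (g : List Int) (h : g ≠ []) : fmtSeg g = emitChunk g := by
  cases g with
  | nil => exact absurd rfl h
  | cons x t =>
    unfold fmtSeg
    rw [PySem.List.pyGet?_zero_cons, PySem.List.pyGet?_neg_one]
    unfold emitChunk
    have h1 : (some x).getD 0 = (x :: t).headD 0 := rfl
    have h2 : ((x :: t).getLast?).getD 0 = (x :: t).getLastD 0 := by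
      simp [List.getLastD_eq_getLast?]
    rw [h1, h2]

theorem fmt_slice_segPairs (gs : List (List Int)) (hne : ∀ g ∈ gs, g ≠ []) (pre s : List Int)
    (hflat : s = pre ++ gs.flatten) :
    (segPairs (pre.length : Int) gs).map
      (fun ab => fmtSeg (PySem.List.slice s (some ab.1) (some ab.2)))
    = gs.map emitChunk := by
  subst hflat
  rw [show (fun ab : Int × Int => fmtSeg (PySem.List.slice (pre ++ gs.flatten) (some ab.1) (some ab.2)))
      = fmtSeg ∘ (fun ab : Int × Int => PySem.List.slice (pre ++ gs.flatten) (some ab.1) (some ab.2)) from rfl]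
  rw [← List.map_map, slice_segPairs]
  exact List.map_congr_left (fun g hg => emit_eq_emitChunk g (hne g hg))

-- ===== VERDICT (by name: the statement is the Claim_ definition above) =====
theorem build_codepoint_set_spec : Claim_equal_build_codepoint_set := by
  intro codepoints _ hpre
  unfold Spec_build_codepoint_set
  rcases codepoints with _ | ⟨x, xs⟩
  · exact absurd rfl hpre
  · obtain ⟨c0, rest, hs⟩ : ∃ c0 rest,
        PySem.List.sorted (x :: xs) (fun v => v) false = c0 :: rest := by
      rcases h0 : PySem.List.sorted (x :: xs) (fun v => v) false with _ | ⟨a, b⟩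
      · exact absurd ((PySem.List.sorted_eq_nil_iff _ _ _).mp h0) (by simp)
      · exact ⟨a, b, rfl⟩
    have hA : build_codepoint_set (x :: xs) = (chunks (c0 :: rest)).map emitChunk := by
      unfold build_codepoint_set
      rw [hs]
      dsimp only
      rw [foldA_eq_chunks rest [] c0 c0]
      obtain ⟨g, gs, hg⟩ := chunks_cons_head c0 rest
      rw [hg]
      have hemit : emitChunk (c0 :: g) = build_codepoint_range c0 ((c0 :: g).getLastD 0) := by
        simp [emitChunk, build_codepoint_range]
      simp [hemit]
    have hB : build_codepoint_set_alt (x :: xs) = (chunks (c0 :: rest)).map emitChunk := by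
      show ((0 :: ((PySem.List.enumerate
              ((PySem.List.sorted (x :: xs) (fun v => v) false).zip
                (PySem.List.slice (PySem.List.sorted (x :: xs) (fun v => v) false) (some 1) none)) 1).filter
              (fun t => decide (t.2.2 - t.2.1 ≠ 1))).map Prod.fst
            ++ [((PySem.List.sorted (x :: xs) (fun v => v) false).length : Int)]).zip
            (PySem.List.slice (0 :: ((PySem.List.enumerate
              ((PySem.List.sorted (x :: xs) (fun v => v) false).zip
                (PySem.List.slice (PySem.List.sorted (x :: xs) (fun v => v) false) (some 1) none)) 1).filter
              (fun t => decide (t.2.2 - t.2.1 ≠ 1))).map Prod.fst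
            ++ [((PySem.List.sorted (x :: xs) (fun v => v) false).length : Int)]) (some 1) none)).map
          (fun ab => fmtSeg (PySem.List.slice (PySem.List.sorted (x :: xs) (fun v => v) false)
            (some ab.1) (some ab.2)))
        = (chunks (c0 :: rest)).map emitChunk
      simp only [PySem.List.slice_from_one]
      rw [hs]
      have hcuts : ((PySem.List.enumerate ((c0 :: rest).zip (c0 :: rest).tail) 1).filter
          (fun t => decide (t.2.2 - t.2.1 ≠ 1))).map Prod.fst = cutsE (c0 :: rest) 1 := rfl
      rw [hcuts]
      have hbb : (0 : Int) :: cutsE (c0 :: rest) 1 ++ [((c0 :: rest).length : Int)]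
          = bnds (chunks (c0 :: rest)) := (bnds_chunks (c0 :: rest) (by simp)).symm
      rw [hbb]
      rw [zip_bnds]
      rw [show (0 : Int) = ((([] : List Int)).length : Int) by simp]
      exact fmt_slice_segPairs (chunks (c0 :: rest)) (chunks_mem_ne_nil (c0 :: rest)) [] (c0 :: rest)
        (by simp [chunks_flatten])
    rw [hA, hB]
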